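-- pv_equiv track=rewrite | github.com/avi1152111680093/ML-Project | BIRCH/cf_node.py | linear_sum
-- ===== SOURCE A (Python) =====
-- def linear_sum (dp):
--     # dp --> List of the data points
--     ls = []
--     for i in range(len(dp[0])):
--         sum = 0
--         for j in range(len(dp)):
--             sum += dp[j][i]
--         ls.append(sum)
--     return ls
-- ===== SOURCE B (Python) =====
-- def linear_sum(dp):
--     # dp --> List of the data points
--     ls = [0] * len(dp[0])
--     for point in dp:
--         ls = [a + b for a, b in zip(ls, point)]
--     return ls
-- ===== Notes on version B (the rewrite author's own statement) =====
-- stated objective: idiomatic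
-- what changed: Replaces the column-indexed double loop (recomputing each column sum by re-indexing all rows per column) with a single pass over the data points that folds each point into an accumulator vector via a zip comprehension.
import Mathlib
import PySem

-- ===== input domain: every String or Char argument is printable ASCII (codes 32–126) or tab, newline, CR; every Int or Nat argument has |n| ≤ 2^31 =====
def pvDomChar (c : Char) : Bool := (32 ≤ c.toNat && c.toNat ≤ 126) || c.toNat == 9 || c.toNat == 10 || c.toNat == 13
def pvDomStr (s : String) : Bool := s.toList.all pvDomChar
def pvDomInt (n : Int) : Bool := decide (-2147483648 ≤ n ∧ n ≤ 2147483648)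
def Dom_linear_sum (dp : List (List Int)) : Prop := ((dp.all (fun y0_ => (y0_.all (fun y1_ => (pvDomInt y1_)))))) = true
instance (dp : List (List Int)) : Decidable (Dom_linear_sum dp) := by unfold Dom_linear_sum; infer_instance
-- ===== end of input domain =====

-- B replaces the column-indexed double loop with a single zip-fold pass over the data points (idiomatic; same cost).
-- ===== PORT A =====
def linear_sum (dp : List (List Int)) : List Int :=
  (List.range (PySem.List.pyGetD dp 0 []).length).foldl
    (fun (ls : List Int) (i : Nat) =>
      ls ++ [(List.range dp.length).foldl
               (fun (s : Int) (j : Nat) => s + PySem.List.pyGetD (PySem.List.pyGetD dp (j : Int) []) (i : Int) 0) 0])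
    []

-- ===== PORT B =====
def linear_sum_alt (dp : List (List Int)) : List Int :=
  dp.foldl (fun ls point => List.zipWith (· + ·) ls point)
    (List.replicate (PySem.List.pyGetD dp 0 []).length 0)

-- ===== PRECONDITION & SPEC =====
-- Pre_ excludes inputs where A raises IndexError: empty dp (dp[0]) and any row shorter than the first row (dp[j][i]).
def Pre_linear_sum (dp : List (List Int)) : Prop :=
  dp ≠ [] ∧ ∀ r ∈ dp, (dp.headD []).length ≤ r.length
instance (dp : List (List Int)) : Decidable (Pre_linear_sum dp) := by unfold Pre_linear_sum; infer_instance
def pvWitness_linear_sum : List (List Int) := [[1, 2], [3, 4], [5, 6]]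
def Spec_linear_sum (dp : List (List Int)) (out : List Int) : Prop := out = linear_sum_alt dp
instance (dp : List (List Int)) (out : List Int) : Decidable (Spec_linear_sum dp out) := by unfold Spec_linear_sum; infer_instance

-- ===== CLAIM (what is proved, stated in full; the proofs are below) =====
def Claim_equal_linear_sum : Prop := ∀ (dp : List (List Int)), Dom_linear_sum dp → Pre_linear_sum dp → Spec_linear_sum dp (linear_sum dp)

-- ===== LEMMAS AND PROOFS =====

-- xs[j] read through getD over range(len(xs)) is just xs itself
lemma map_getD_range {α : Type} (xs : List α) (d : α) :
    (List.range xs.length).map (fun j => xs.getD j d) = xs := by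
  apply List.ext_getElem
  · simp
  · intro i h1 h2
    have hx : i < xs.length := by simpa using h1
    simp [List.getD_eq_getElem?_getD, List.getElem?_eq_getElem hx]

-- A's inner loop over indices equals the fold over the rows themselves
lemma colsum_eq (dp : List (List Int)) (i : Nat) :
    (List.range dp.length).foldl (fun s j => s + (dp.getD j []).getD i 0) 0
      = dp.foldl (fun s r => s + r.getD i 0) 0 := by
  conv_rhs => rw [← map_getD_range dp []]
  rw [List.foldl_map]

-- B's zip-fold, characterised pointwise: the accumulator stays length n and
-- collects the column sums of all rows folded so far
lemma foldl_zipWith_char (n : Nat) :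
    ∀ (dp : List (List Int)) (acc : List Int), acc.length = n → (∀ r ∈ dp, n ≤ r.length) →
      dp.foldl (fun ls p => List.zipWith (· + ·) ls p) acc
        = (List.range n).map (fun i => acc.getD i 0 + dp.foldl (fun s r => s + r.getD i 0) 0) := by
  intro dp
  induction dp with
  | nil =>
      intro acc hlen _
      simp only [List.foldl_nil, add_zero]
      subst hlen
      exact (map_getD_range acc 0).symm
  | cons r dp ih =>
      intro acc hlen hrows
      have hr : n ≤ r.length := hrows r (by simp)
      have hzlen : (List.zipWith (· + ·) acc r).length = n := by
        simp [List.length_zipWith, hlen]; omega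
      simp only [List.foldl_cons]
      rw [ih (List.zipWith (· + ·) acc r) hzlen (fun s hs => hrows s (by simp [hs]))]
      apply List.map_congr_left
      intro i hi
      have hi' : i < n := List.mem_range.mp hi
      have hget : (List.zipWith (· + ·) acc r).getD i 0 = acc.getD i 0 + r.getD i 0 := by
        have h1 : i < acc.length := by omega
        have h2 : i < r.length := by omega
        rw [List.getD_eq_getElem _ _ (by omega), List.getElem_zipWith,
            List.getD_eq_getElem _ _ h1, List.getD_eq_getElem _ _ h2]
      have hshift : ∀ (xs : List (List Int)) (a : Int),
          xs.foldl (fun s q => s + q.getD i 0) a = a + xs.foldl (fun s q => s + q.getD i 0) 0 := by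
        intro xs
        induction xs with
        | nil => intro a; simp
        | cons y ys ihy =>
            intro a
            simp only [List.foldl_cons]
            rw [ihy (a + y.getD i 0), ihy (0 + y.getD i 0)]
            ring
      rw [hget, hshift dp (0 + r.getD i 0)]
      ring

-- ===== VERDICT (by name: the statement is the Claim_ definition above) =====
theorem linear_sum_spec : Claim_equal_linear_sum := by
  intro dp hdom hpre
  obtain ⟨hne, hrows⟩ := hpre
  obtain ⟨h, t, rfl⟩ : ∃ h t, dp = h :: t := by
    cases dp with
    | nil => exact absurd rfl hne
    | cons h t => exact ⟨h, t, rfl⟩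
  unfold Spec_linear_sum linear_sum linear_sum_alt
  have hhead : PySem.List.pyGetD (h :: t) (0 : Int) [] = h := by
    simp [PySem.List.pyGetD_zero_cons]
  rw [hhead]
  rw [PySem.List.foldl_append_singleton_eq_map]
  rw [foldl_zipWith_char h.length (h :: t) (List.replicate h.length 0) (by simp)
        (fun r hr => hrows r (by simpa using hr))]
  apply List.map_congr_left
  intro i hi
  simp only [PySem.List.pyGetD_natCast]
  rw [colsum_eq]
  have hrep : (List.replicate h.length (0 : Int)).getD i 0 = 0 := by
    rcases Nat.lt_or_ge i h.length with hlt | hge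
    · rw [List.getD_eq_getElem _ _ (by simpa using hlt), List.getElem_replicate]
    · rw [List.getD_eq_default _ _ (by simpa using hge)]
  rw [hrep, zero_add]
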